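-- pv_equiv track=rewrite | github.com/jano31415/codejam | codeforces/110_round_edu/probb.py | solve
-- ===== SOURCE A (Python) =====
-- import math
--
-- def solve(N,numbers):
--     numbers2 = [x for x in numbers if x%2 ==0]
--     numbers_not2 = [x for x in numbers if x%2 !=0]
--     numbers_new = numbers2 + numbers_not2
--     # assert len(numbers_new) == len(numbers)
--     tot = 0
--     for i,ai in enumerate(numbers_new):
--         for j in range(i+1, len(numbers_new)):
--             aj = 2*numbers_new[j]
--             if math.gcd(ai,aj) > 1:
--                 tot+=1
--     return tot
-- ===== SOURCE B (Python) =====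
-- import math
--
-- def solve(N, numbers):
--     evens = [x for x in numbers if x % 2 == 0]
--     odds = [x for x in numbers if x % 2 != 0]
--     e = len(evens)
--     o = len(odds)
--     z = evens.count(0)
--     # every (even, later) pair counts except (0, 0) pairs; every (even, odd) pair counts
--     tot = e * (e - 1) // 2 - z * (z - 1) // 2 + e * o
--     # for odd ai, gcd(ai, 2*aj) = gcd(ai, aj): plain pairwise gcd over the odds only
--     rest = odds
--     while rest:
--         x, rest = rest[0], rest[1:]
--         for y in rest:
--             if math.gcd(x, y) > 1:
--                 tot += 1
--     return tot
-- ===== Notes on version B (the rewrite author's own statement) =====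
-- stated objective: faster
-- what changed: B replaces A's O(n^2) double loop over the reordered list by a closed-form count for all pairs involving an even element (C(e,2)-C(z,2)+e*o, using that gcd(even,2*aj)>1 except for 0-0 pairs) and runs the pairwise gcd loop only over the odd elements with gcd(x,y) instead of gcd(x,2*y).
import Mathlib
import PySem

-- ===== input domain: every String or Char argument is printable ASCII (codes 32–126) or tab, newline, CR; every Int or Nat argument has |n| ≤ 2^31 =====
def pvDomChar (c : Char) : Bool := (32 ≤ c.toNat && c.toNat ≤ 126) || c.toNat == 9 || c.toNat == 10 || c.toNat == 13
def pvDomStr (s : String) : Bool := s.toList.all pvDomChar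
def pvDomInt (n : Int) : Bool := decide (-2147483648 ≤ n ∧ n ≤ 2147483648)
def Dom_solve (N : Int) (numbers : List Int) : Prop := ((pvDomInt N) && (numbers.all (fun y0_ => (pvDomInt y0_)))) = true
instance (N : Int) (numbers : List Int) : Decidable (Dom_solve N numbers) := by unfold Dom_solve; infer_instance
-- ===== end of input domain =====

-- B replaces A's double loop over the whole reordered list by a closed-form count of all
-- pairs whose first element is even, plus a pairwise-gcd loop over the odd elements only.

-- ===== PORT A =====
def solve (N : Int) (numbers : List Int) : Int :=
  let numbers2 := numbers.filter (fun x => PySem.Int.mod x 2 == 0)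
  let numbersNot2 := numbers.filter (fun x => PySem.Int.mod x 2 != 0)
  let numbersNew := numbers2 ++ numbersNot2
  (PySem.List.enumerate numbersNew).foldl (fun tot p =>
    (PySem.List.pyRange (p.1 + 1) (numbersNew.length : Int) 1).foldl (fun tot j =>
      let aj := 2 * PySem.List.pyGetD numbersNew j 0
      if Int.gcd p.2 aj > 1 then tot + 1 else tot) tot) 0

-- ===== PORT B =====
-- the 'while rest:' loop of Source B
def solveAltLoop (tot : Int) : List Int → Int
  | [] => tot
  | x :: rest => solveAltLoop (rest.foldl (fun t y => if Int.gcd x y > 1 then t + 1 else t) tot) rest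

def solve_alt (N : Int) (numbers : List Int) : Int :=
  let evens := numbers.filter (fun x => PySem.Int.mod x 2 == 0)
  let odds := numbers.filter (fun x => PySem.Int.mod x 2 != 0)
  let e : Int := evens.length
  let o : Int := odds.length
  let z : Int := evens.count 0
  let tot := PySem.Int.floordiv (e * (e - 1)) 2 - PySem.Int.floordiv (z * (z - 1)) 2 + e * o
  solveAltLoop tot odds

-- ===== PRECONDITION & SPEC =====
def Spec_solve (N : Int) (numbers : List Int) (out : Int) : Prop := out = solve_alt N numbers
instance (N : Int) (numbers : List Int) (out : Int) : Decidable (Spec_solve N numbers out) := by unfold Spec_solve; infer_instance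

-- ===== CLAIM (what is proved, stated in full; the proofs are below) =====
def Claim_equal_solve : Prop := ∀ (N : Int) (numbers : List Int), Dom_solve N numbers → Spec_solve N numbers (solve N numbers)

-- ===== LEMMAS AND PROOFS =====

-- structural "number of pairs i < j with f a_i a_j" of a list
def pairSum (f : Int → Int → Bool) : List Int → Int
  | [] => 0
  | x :: xs => (xs.countP (f x) : Int) + pairSum f xs

-- A's pair test, B's odd-pair test, and the test A's amounts to on an even first element
def fA : Int → Int → Bool := fun x y => decide (1 < Int.gcd x (2 * y))
def fB : Int → Int → Bool := fun x y => decide (1 < Int.gcd x y)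
def g0 : Int → Int → Bool := fun x y => !(x == 0 && y == 0)

-- A's index-based double loop is the structural pair count
lemma foldA (l : List Int) : ∀ (pre : List Int) (tot : Int),
    (PySem.List.enumerate l (pre.length : Int)).foldl
      (fun tot p =>
        (PySem.List.pyRange (p.1 + 1) ((pre ++ l).length : Int) 1).foldl
          (fun t j => if 1 < Int.gcd p.2 (2 * PySem.List.pyGetD (pre ++ l) j 0) then t + 1 else t) tot) tot
    = tot + pairSum fA l := by
  induction l with
  | nil => intro pre tot; simp [PySem.List.enumerate_nil, pairSum]
  | cons x l' ih =>
    intro pre tot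
    rw [PySem.List.enumerate_cons, List.foldl_cons]
    simp only
    have hsplit : pre ++ x :: l' = (pre ++ [x]) ++ l' := by simp
    have hstart : (pre.length : Int) + 1 = ((pre ++ [x]).length : Int) := by simp
    rw [hsplit]
    have hfirst :
        (PySem.List.pyRange ((pre.length : Int) + 1) (((pre ++ [x]) ++ l').length : Int) 1).foldl
          (fun t j => if 1 < Int.gcd x (2 * PySem.List.pyGetD ((pre ++ [x]) ++ l') j 0) then t + 1 else t) tot
        = tot + (l'.countP (fA x) : Int) := by
      rw [hstart]
      rw [PySem.List.foldl_pyRange_pyGetD' ((pre ++ [x]) ++ l') 0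
            (fun t y => if 1 < Int.gcd x (2 * y) then t + 1 else t) tot (by positivity)]
      have hdrop : (((pre ++ [x]).length : Int)).toNat = (pre ++ [x]).length := by simp
      rw [hdrop, List.drop_left]
      rw [PySem.List.foldl_ite_add_one]
      rfl
    rw [hfirst, hstart, ih (pre ++ [x]), pairSum]
    ring

lemma pairSum_append (f : Int → Int → Bool) (E O : List Int) :
    pairSum f (E ++ O) = pairSum f E + (E.map (fun x => (O.countP (f x) : Int))).sum + pairSum f O := by
  induction E with
  | nil => simp [pairSum]
  | cons x E' ih =>
    simp only [List.cons_append, pairSum, List.countP_append, List.map_cons, List.sum_cons, ih]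
    push_cast
    ring

lemma pairSum_congr (f g : Int → Int → Bool) (l : List Int)
    (h : ∀ x ∈ l, ∀ y ∈ l, f x y = g x y) : pairSum f l = pairSum g l := by
  induction l with
  | nil => rfl
  | cons x l' ih =>
    simp only [pairSum]
    rw [List.countP_congr (fun y hy => by rw [h x (by simp) y (by simp [hy])]),
        ih (fun a ha b hb => h a (by simp [ha]) b (by simp [hb]))]

-- for even x, A's test holds except on a 0-0 pair
lemma fA_even (x y : Int) (hx : (2:Int) ∣ x) : fA x y = g0 x y := by
  by_cases h0 : x = 0
  · subst h0
    by_cases hy : y = 0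
    · subst hy; decide
    · have hy' : y.natAbs ≠ 0 := Int.natAbs_ne_zero.mpr hy
      have habs : (2 * y).natAbs = 2 * y.natAbs := by
        rw [Int.natAbs_mul]; rfl
      simp only [fA, g0, Int.gcd, Int.natAbs_zero, Nat.gcd_zero_left, habs]
      have hgt : 1 < 2 * y.natAbs := by omega
      simp [hgt, hy]
  · have h2 : 2 ∣ x.natAbs := Int.ofNat_dvd_left.mp hx
    have h2' : 2 ∣ (2 * y).natAbs := Int.ofNat_dvd_left.mp ⟨y, rfl⟩
    have hg : 2 ∣ Int.gcd x (2 * y) := Nat.dvd_gcd h2 h2'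
    have hne : Int.gcd x (2 * y) ≠ 0 := by
      simp [Int.gcd_eq_zero_iff, h0]
    have hgt : 1 < Int.gcd x (2 * y) := by omega
    simp [fA, g0, hgt, h0]

-- for even x and odd y, A's test always holds
lemma fA_cross (x y : Int) (hx : (2:Int) ∣ x) (hy : ¬ (2:Int) ∣ y) : fA x y = true := by
  rw [fA_even x y hx]
  have : y ≠ 0 := by rintro rfl; exact hy ⟨0, by ring⟩
  simp [g0, this]

-- for odd x, gcd(x, 2y) = gcd(x, y)
lemma fA_odd (x y : Int) (hx : ¬ (2:Int) ∣ x) : fA x y = fB x y := by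
  have hc : Nat.Coprime x.natAbs 2 := by
    have h2 : ¬ 2 ∣ x.natAbs := fun hd => hx (Int.ofNat_dvd_left.mpr hd)
    exact ((Nat.Prime.coprime_iff_not_dvd Nat.prime_two).mpr h2).symm
  have habs : (2 * y).natAbs = 2 * y.natAbs := by
    rw [Int.natAbs_mul]; rfl
  simp only [fA, fB, Int.gcd, habs]
  rw [Nat.gcd_mul_right_right_of_gcd_eq_one hc]
  rfl

lemma countP_not_zero (l : List Int) : l.countP (fun y => !(y == 0)) = l.length - l.count 0 := by
  rw [List.count_eq_countP]
  induction l with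
  | nil => simp
  | cons a t ih =>
    have := List.countP_le_length (p := fun y : Int => y == 0) (l := t)
    by_cases hp : a = (0:Int) <;> simp [hp, ih] <;> omega

-- closed form for the even-prefix pair count
lemma pairSum_g0 (E : List Int) :
    2 * pairSum g0 E = (E.length : Int) * ((E.length : Int) - 1) - (E.count 0 : Int) * ((E.count 0 : Int) - 1) := by
  induction E with
  | nil => simp [pairSum]
  | cons x E' ih =>
    by_cases h0 : x = 0
    · subst h0
      have hc : E'.countP (g0 0) = E'.length - E'.count 0 := by
        simpa [g0] using countP_not_zero E'
      have hle : E'.count 0 ≤ E'.length := List.count_le_length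
      simp [pairSum, hc]
      push_cast [hle]
      linear_combination ih
    · have hc : E'.countP (g0 x) = E'.length := by
        apply List.countP_eq_length.mpr
        intro y _
        simp [g0, h0]
      simp [pairSum, hc, h0]
      push_cast
      linear_combination ih

-- B's while-loop is the structural pair count over the odds
lemma solveAltLoop_eq (O : List Int) : ∀ tot : Int, solveAltLoop tot O = tot + pairSum fB O := by
  induction O with
  | nil => intro tot; simp [solveAltLoop, pairSum]
  | cons x rest ih =>
    intro tot
    rw [solveAltLoop, ih, PySem.List.foldl_ite_add_one]
    change tot + (List.countP (fB x) rest : Int) + pairSum fB rest = _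
    simp only [pairSum]
    ring

-- ===== VERDICT (by name: the statement is the Claim_ definition above) =====
theorem solve_spec : Claim_equal_solve := by
  unfold Claim_equal_solve Spec_solve
  intro N numbers _
  unfold solve solve_alt
  simp only [gt_iff_lt]
  set E := numbers.filter (fun x => PySem.Int.mod x 2 == 0) with hEdef
  set O := numbers.filter (fun x => PySem.Int.mod x 2 != 0) with hOdef
  have hE : ∀ x ∈ E, (2:Int) ∣ x := by
    intro x hx
    have := (List.mem_filter.mp hx).2
    simp only [beq_iff_eq] at this
    exact (PySem.Int.mod_eq_zero_iff_dvd x 2).mp this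
  have hO : ∀ x ∈ O, ¬ (2:Int) ∣ x := by
    intro x hx hdvd
    have := (List.mem_filter.mp hx).2
    simp only [bne_iff_ne, ne_eq] at this
    exact this ((PySem.Int.mod_eq_zero_iff_dvd x 2).mpr hdvd)
  have hA := foldA (E ++ O) [] 0
  simp only [List.nil_append, List.length_nil, Nat.cast_zero] at hA
  refine hA.trans ?_
  rw [pairSum_append, solveAltLoop_eq]
  have h1 : pairSum fA E = pairSum g0 E :=
    pairSum_congr _ _ _ (fun x hx y _ => fA_even x y (hE x hx))
  have h2 : (E.map (fun x => (O.countP (fA x) : Int))).sum = (E.length : Int) * (O.length : Int) := by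
    rw [List.map_congr_left (fun x hx => by
      rw [List.countP_eq_length.mpr (fun y hy => fA_cross x y (hE x hx) (hO y hy))])]
    rw [PySem.List.sum_map_const_int]
  have h3 : pairSum fA O = pairSum fB O :=
    pairSum_congr _ _ _ (fun x hx y _ => fA_odd x y (hO x hx))
  rw [h1, h2, h3]
  have hps := pairSum_g0 E
  have hfd : ∀ a : Int, PySem.Int.floordiv a 2 = a / 2 := fun a =>
    PySem.Int.floordiv_eq_ediv_of_pos (by norm_num)
  rw [hfd, hfd]
  have ha : ((E.length : Int)) * ((E.length : Int) - 1) % 2 = 0 := by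
    have := Int.even_mul_succ_self ((E.length : Int) - 1)
    rw [sub_add_cancel] at this
    rw [mul_comm]
    exact Int.even_iff.mp this
  have hb : ((E.count 0 : Int)) * ((E.count 0 : Int) - 1) % 2 = 0 := by
    have := Int.even_mul_succ_self ((E.count 0 : Int) - 1)
    rw [sub_add_cancel] at this
    rw [mul_comm]
    exact Int.even_iff.mp this
  omega
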